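-- pv_equiv track=rewrite | github.com/ccruz0/crypto-2.0 | secret-console/verify.py | _aggregate_runtime_detail
-- ===== SOURCE A (Python) =====
-- from typing import Any
--
-- def _aggregate_runtime_detail(checks: list[dict[str, Any]]) -> str:
--     if not checks:
--         return "SKIP"
--     details = [c["detail"] for c in checks]
--     if any(d == "MISSING" for d in details):
--         return "MISSING"
--     if any(d == "MISMATCH" for d in details):
--         return "MISMATCH"
--     if all(d == "OK" for d in details):
--         return "OK"
--     return "MISMATCH"
-- ===== SOURCE B (Python) =====
-- def _aggregate_runtime_detail(checks: list) -> str: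
--     if not checks:
--         return "SKIP"
--     rank = {"MISSING": 3, "MISMATCH": 2, "OK": 1}
--     r = max(rank.get(c["detail"], 2) for c in checks)
--     return {3: "MISSING", 2: "MISMATCH", 1: "OK"}[r]
-- ===== Notes on version B (the rewrite author's own statement) =====
-- stated objective: idiomatic
-- what changed: Replaced the sequential any/any/all short-circuit scans over the details list with a single max-reduction over a numeric priority rank (MISSING=3, MISMATCH=2 and default, OK=1) mapped back to its status string; Pre_ excludes inputs where some check dict lacks the 'detail' key, on which both A and B raise KeyError.
import Mathlib
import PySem

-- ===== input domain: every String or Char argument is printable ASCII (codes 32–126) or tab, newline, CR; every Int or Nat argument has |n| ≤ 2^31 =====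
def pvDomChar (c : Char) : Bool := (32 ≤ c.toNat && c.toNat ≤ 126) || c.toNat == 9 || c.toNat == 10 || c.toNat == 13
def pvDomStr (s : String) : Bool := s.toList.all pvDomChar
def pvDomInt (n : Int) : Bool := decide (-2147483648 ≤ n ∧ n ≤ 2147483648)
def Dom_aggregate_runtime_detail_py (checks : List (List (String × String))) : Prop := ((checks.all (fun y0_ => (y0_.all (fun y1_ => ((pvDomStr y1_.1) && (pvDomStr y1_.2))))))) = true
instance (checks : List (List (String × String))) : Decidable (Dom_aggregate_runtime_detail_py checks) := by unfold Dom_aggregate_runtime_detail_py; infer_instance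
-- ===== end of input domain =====

-- B replaces A's sequential any/any/all scans by one max-reduction over a numeric priority rank (idiomatic alternative, same cost).

-- ===== PORT A =====
-- c["detail"] : first-match lookup in the association list; under Pre_ the key is present, so the getD "" default is never taken.
def pvDetailA (c : List (String × String)) : String :=
  ((PySem.Dict.mk c).get? "detail").getD ""

def aggregate_runtime_detail_py (checks : List (List (String × String))) : String :=
  if checks = [] then "SKIP"
  else if (checks.map pvDetailA).any (fun d => d == "MISSING") then "MISSING"
  else if (checks.map pvDetailA).any (fun d => d == "MISMATCH") then "MISMATCH"
  else if (checks.map pvDetailA).all (fun d => d == "OK") then "OK"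
  else "MISMATCH"

-- ===== PORT B =====
-- rank.get(c["detail"], 2) with rank = {"MISSING": 3, "MISMATCH": 2, "OK": 1}
def pvRankB (c : List (String × String)) : Int :=
  (PySem.Dict.get?
      (PySem.Dict.ofList [("MISSING", (3 : Int)), ("MISMATCH", 2), ("OK", 1)])
      (((PySem.Dict.mk c).get? "detail").getD "")).getD 2

-- {3: "MISSING", 2: "MISMATCH", 1: "OK"}[r]; r is always 1, 2 or 3 so the "" default is never taken.
def pvBackB (r : Int) : String :=
  (PySem.Dict.get?
      (PySem.Dict.ofList [((3 : Int), "MISSING"), (2, "MISMATCH"), (1, "OK")]) r).getD ""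

def aggregate_runtime_detail_py_alt (checks : List (List (String × String))) : String :=
  if checks = [] then "SKIP"
  else
    match PySem.List.max? (checks.map pvRankB) (fun y => y) with
    | some r => pvBackB r
    | none => ""

-- ===== PRECONDITION & SPEC =====
-- Pre_ excludes inputs where some check dict lacks the "detail" key: there A (and B alike) raise KeyError.
def Pre_aggregate_runtime_detail_py (checks : List (List (String × String))) : Prop :=
  (checks.all (fun c => c.any (fun p => p.1 == "detail"))) = true
instance (checks : List (List (String × String))) : Decidable (Pre_aggregate_runtime_detail_py checks) := by unfold Pre_aggregate_runtime_detail_py; infer_instance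

def pvWitness_aggregate_runtime_detail_py : (List (List (String × String))) :=
  [[("detail", "OK")], [("detail", "MISMATCH"), ("name", "x")]]

def Spec_aggregate_runtime_detail_py (checks : List (List (String × String))) (out : String) : Prop := out = aggregate_runtime_detail_py_alt checks
instance (checks : List (List (String × String))) (out : String) : Decidable (Spec_aggregate_runtime_detail_py checks out) := by unfold Spec_aggregate_runtime_detail_py; infer_instance

-- ===== CLAIM (what is proved, stated in full; the proofs are below) =====
def Claim_equal_aggregate_runtime_detail_py : Prop := ∀ (checks : List (List (String × String))), Dom_aggregate_runtime_detail_py checks → Pre_aggregate_runtime_detail_py checks → Spec_aggregate_runtime_detail_py checks (aggregate_runtime_detail_py checks)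

-- ===== LEMMAS AND PROOFS =====

-- abstract rank of a detail string (proof-only helper)
def pvRank (d : String) : Int := if d = "MISSING" then 3 else if d = "OK" then 1 else 2

theorem pvRankLookup (d : String) :
    (PySem.Dict.get? (PySem.Dict.ofList [("MISSING", (3 : Int)), ("MISMATCH", 2), ("OK", 1)]) d).getD 2
      = pvRank d := by
  have h : PySem.Dict.ofList [("MISSING", (3 : Int)), ("MISMATCH", 2), ("OK", 1)]
      = PySem.Dict.mk [("MISSING", 3), ("MISMATCH", 2), ("OK", 1)] := by decide
  rw [h]
  simp only [PySem.Dict.get?_mk_cons, pvRank, beq_iff_eq]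
  by_cases h1 : d = "MISSING" <;> by_cases h2 : d = "MISMATCH" <;> by_cases h3 : d = "OK" <;>
    simp_all [eq_comm, PySem.Dict.get?]

theorem pvRankB_eq (c : List (String × String)) : pvRankB c = pvRank (pvDetailA c) := by
  unfold pvRankB pvDetailA
  exact pvRankLookup _

theorem pvRank_cases (d : String) : pvRank d = 1 ∨ pvRank d = 2 ∨ pvRank d = 3 := by
  unfold pvRank; split_ifs <;> simp

theorem pvRank_eq_three_iff (d : String) : pvRank d = 3 ↔ d = "MISSING" := by
  unfold pvRank; split_ifs <;> simp_all

theorem pvRank_eq_one_iff (d : String) : pvRank d = 1 ↔ d = "OK" := by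
  unfold pvRank; split_ifs <;> simp_all

theorem pvFoldlMaxMem (l : List Int) (a : Int) : l.foldl max a = a ∨ l.foldl max a ∈ l := by
  induction l generalizing a with
  | nil => left; rfl
  | cons x t ih =>
    simp only [List.foldl_cons]
    rcases ih (max a x) with h | h
    · rcases max_choice a x with hm | hm
      · left; rw [h, hm]
      · right; rw [h, hm]; exact List.mem_cons_self
    · right; exact List.mem_cons_of_mem _ h

theorem aggregate_main (c : List (String × String)) (t : List (List (String × String))) :
    aggregate_runtime_detail_py (c :: t) = aggregate_runtime_detail_py_alt (c :: t) := by
  unfold aggregate_runtime_detail_py aggregate_runtime_detail_py_alt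
  rw [if_neg (List.cons_ne_nil c t), if_neg (List.cons_ne_nil c t)]
  simp only [List.map_cons]
  rw [PySem.List.max?_id_cons]
  set m := (t.map pvRankB).foldl max (pvRankB c) with hm
  -- m is the rank of some element
  have hmem : ∃ x ∈ c :: t, pvRank (pvDetailA x) = m := by
    rcases pvFoldlMaxMem (t.map pvRankB) (pvRankB c) with h | h
    · exact ⟨c, List.mem_cons_self, by rw [← pvRankB_eq, hm]; exact h.symm⟩
    · rw [← hm] at h
      rcases List.mem_map.mp h with ⟨x, hx, hxe⟩
      exact ⟨x, List.mem_cons_of_mem _ hx, by rw [← pvRankB_eq, hxe]⟩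
  -- m bounds every rank
  have hub : ∀ x ∈ c :: t, pvRank (pvDetailA x) ≤ m := by
    intro x hx
    rcases List.mem_cons.mp hx with rfl | hx'
    · rw [← pvRankB_eq]; exact (PySem.List.le_foldl_max (t.map pvRankB) (pvRankB x)).1
    · rw [← pvRankB_eq]
      exact (PySem.List.le_foldl_max (t.map pvRankB) (pvRankB c)).2 _ (List.mem_map_of_mem hx')
  have hmval : m = 1 ∨ m = 2 ∨ m = 3 := by
    rcases hmem with ⟨x, _, hx⟩; rw [← hx]; exact pvRank_cases _
  rcases hmval with h1 | h2 | h3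
  · -- m = 1 : every detail is "OK"
    have hall : ∀ x ∈ c :: t, pvDetailA x = "OK" := by
      intro x hx
      have hle := hub x hx
      rcases pvRank_cases (pvDetailA x) with hr | hr | hr
      · exact (pvRank_eq_one_iff _).mp hr
      all_goals rw [hr] at hle; omega
    have hany1 : ((c :: t).map pvDetailA).any (fun d => d == "MISSING") = false := by
      simp only [List.any_map, List.any_eq_false]
      intro x hx; simp [hall x hx]
    have hany2 : ((c :: t).map pvDetailA).any (fun d => d == "MISMATCH") = false := by
      simp only [List.any_map, List.any_eq_false]
      intro x hx; simp [hall x hx]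
    have hallok : ((c :: t).map pvDetailA).all (fun d => d == "OK") = true := by
      simp only [List.all_map, List.all_eq_true]
      intro x hx; simp [hall x hx]
    simp only [List.map_cons] at hany1 hany2 hallok
    rw [h1]
    simp only [hany1, hany2, hallok]
    decide
  · -- m = 2 : no "MISSING"; result is "MISMATCH" either way
    have hnomiss : ((c :: t).map pvDetailA).any (fun d => d == "MISSING") = false := by
      simp only [List.any_map, List.any_eq_false]
      intro x hx
      have hle := hub x hx
      rw [h2] at hle
      simp only [Function.comp, beq_iff_eq]
      intro hcontra
      have : pvRank (pvDetailA x) = 3 := (pvRank_eq_three_iff _).mpr hcontra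
      omega
    simp only [List.map_cons] at hnomiss
    by_cases hmm : ((c :: t).map pvDetailA).any (fun d => d == "MISMATCH") = true
    · simp only [List.map_cons] at hmm
      rw [h2]; simp only [hnomiss, hmm, Bool.false_eq_true, if_false, if_true]; decide
    · rw [Bool.not_eq_true] at hmm
      have hnotall : ((c :: t).map pvDetailA).all (fun d => d == "OK") = false := by
        rcases hmem with ⟨x, hx, hxr⟩
        rw [h2] at hxr
        simp only [List.all_map, List.all_eq_false]
        refine ⟨x, hx, ?_⟩
        simp only [Function.comp, beq_iff_eq]
        intro hok
        have : pvRank (pvDetailA x) = 1 := (pvRank_eq_one_iff _).mpr hok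
        omega
      simp only [List.map_cons] at hmm hnotall
      rw [h2]; simp only [hnomiss, hmm, hnotall]
      decide
  · -- m = 3 : some detail is "MISSING"
    have hmiss : ((c :: t).map pvDetailA).any (fun d => d == "MISSING") = true := by
      rcases hmem with ⟨x, hx, hxr⟩
      rw [h3] at hxr
      simp only [List.any_map, List.any_eq_true]
      exact ⟨x, hx, by simp [Function.comp, (pvRank_eq_three_iff _).mp hxr]⟩
    simp only [List.map_cons] at hmiss
    rw [h3]; simp only [hmiss, if_true]
    decide

-- ===== VERDICT (by name: the statement is the Claim_ definition above) =====
theorem aggregate_runtime_detail_py_spec : Claim_equal_aggregate_runtime_detail_py := by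
  intro checks _ _
  unfold Spec_aggregate_runtime_detail_py
  cases checks with
  | nil => rfl
  | cons c t => exact aggregate_main c t
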